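-- pv_equiv track=rewrite | github.com/gitpancake/invaders.embeddings | src/encoder/tile_rerank.py | are_similar_colors
-- ===== SOURCE A (Python) =====
-- def are_similar_colors(c1: str, c2: str) -> bool:
--     """Check if two color names are similar."""
--     dark_colors = {'black', 'navy', 'brown', 'gray'}
--     light_colors = {'white', 'beige', 'light_blue', 'pink'}
--     warm_colors = {'red', 'orange', 'yellow'}
--     cool_colors = {'blue', 'cyan', 'green', 'lime', 'purple'}
--
--     for group in [dark_colors, light_colors, warm_colors, cool_colors]:
--         if c1 in group and c2 in group:
--             return True
--     return False
-- ===== SOURCE B (Python) =====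
-- _GROUPS = (
--     ('black', 'navy', 'brown', 'gray'),
--     ('white', 'beige', 'light_blue', 'pink'),
--     ('red', 'orange', 'yellow'),
--     ('blue', 'cyan', 'green', 'lime', 'purple'),
-- )
--
-- # The similarity relation itself, materialized once: every ordered pair of
-- # colors that lie in the same group.
-- SIMILAR_PAIRS = frozenset((a, b) for g in _GROUPS for a in g for b in g)
--
--
-- def are_similar_colors(c1: str, c2: str) -> bool:
--     """Check if two color names are similar."""
--     return (c1, c2) in SIMILAR_PAIRS
-- ===== Notes on version B (the rewrite author's own statement) =====
-- stated objective: alternative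
-- what changed: Materializes the similarity relation itself as a precomputed frozenset of all same-group ordered pairs, so the body is a single membership test on the pair (c1, c2) with no loop over groups and no per-color membership guards.
import Mathlib
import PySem

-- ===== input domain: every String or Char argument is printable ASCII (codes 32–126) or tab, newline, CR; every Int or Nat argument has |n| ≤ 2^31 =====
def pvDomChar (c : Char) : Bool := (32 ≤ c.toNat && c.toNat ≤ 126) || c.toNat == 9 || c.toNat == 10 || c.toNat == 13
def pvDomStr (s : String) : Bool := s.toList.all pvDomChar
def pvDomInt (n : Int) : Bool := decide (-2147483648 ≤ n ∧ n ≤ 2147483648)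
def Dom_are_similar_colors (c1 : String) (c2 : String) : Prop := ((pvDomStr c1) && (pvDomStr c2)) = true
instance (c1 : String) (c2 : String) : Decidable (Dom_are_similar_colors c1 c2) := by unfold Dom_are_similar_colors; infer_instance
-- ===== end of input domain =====

-- B materializes the similarity relation as one precomputed set of same-group ordered pairs;
-- the body is a single pair-membership test with no loop over groups (alternative; same exact results).

-- ===== PORT A =====
-- the four set literals of A
def pvDark : PySem.Set String := PySem.Set.ofList ["black", "navy", "brown", "gray"]
def pvLight : PySem.Set String := PySem.Set.ofList ["white", "beige", "light_blue", "pink"]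
def pvWarm : PySem.Set String := PySem.Set.ofList ["red", "orange", "yellow"]
def pvCool : PySem.Set String := PySem.Set.ofList ["blue", "cyan", "green", "lime", "purple"]

-- the 'for group in [...]: if c1 in group and c2 in group: return True / return False' loop
def pvGroupLoop (c1 : String) (c2 : String) : List (PySem.Set String) → Bool
  | [] => false
  | g :: rest =>
      if PySem.Set.contains g c1 && PySem.Set.contains g c2 then true
      else pvGroupLoop c1 c2 rest

def are_similar_colors (c1 : String) (c2 : String) : Bool :=
  pvGroupLoop c1 c2 [pvDark, pvLight, pvWarm, pvCool]

-- ===== PORT B =====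
def pvGROUPS : List (List String) :=
  [["black", "navy", "brown", "gray"],
   ["white", "beige", "light_blue", "pink"],
   ["red", "orange", "yellow"],
   ["blue", "cyan", "green", "lime", "purple"]]

-- SIMILAR_PAIRS = frozenset((a, b) for g in _GROUPS for a in g for b in g)
def SIMILAR_PAIRS : PySem.Set (String × String) :=
  PySem.Set.ofList (pvGROUPS.flatMap (fun g => g.flatMap (fun a => g.map (fun b => (a, b)))))

def are_similar_colors_alt (c1 : String) (c2 : String) : Bool :=
  PySem.Set.contains SIMILAR_PAIRS (c1, c2)

-- ===== PRECONDITION & SPEC =====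
def Spec_are_similar_colors (c1 : String) (c2 : String) (out : Bool) : Prop := out = are_similar_colors_alt c1 c2
instance (c1 : String) (c2 : String) (out : Bool) : Decidable (Spec_are_similar_colors c1 c2 out) := by unfold Spec_are_similar_colors; infer_instance

-- ===== CLAIM (what is proved, stated in full; the proofs are below) =====
def Claim_equal_are_similar_colors : Prop := ∀ (c1 : String) (c2 : String), Dom_are_similar_colors c1 c2 → Spec_are_similar_colors c1 c2 (are_similar_colors c1 c2)

-- ===== LEMMAS AND PROOFS =====

-- the 16 known color names
def pvNames : List String :=
  ["black", "navy", "brown", "gray", "white", "beige", "light_blue", "pink",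
   "red", "orange", "yellow", "blue", "cyan", "green", "lime", "purple"]

-- SIMILAR_PAIRS as a literal list (all 66 pairs are distinct, so ofList keeps them all)
set_option maxRecDepth 10000 in
lemma pv_pairs_eq : SIMILAR_PAIRS = ([("black", "black"), ("black", "navy"), ("black", "brown"), ("black", "gray"), ("navy", "black"), ("navy", "navy"), ("navy", "brown"), ("navy", "gray"), ("brown", "black"), ("brown", "navy"), ("brown", "brown"), ("brown", "gray"), ("gray", "black"), ("gray", "navy"), ("gray", "brown"), ("gray", "gray"), ("white", "white"), ("white", "beige"), ("white", "light_blue"), ("white", "pink"), ("beige", "white"), ("beige", "beige"), ("beige", "light_blue"), ("beige", "pink"), ("light_blue", "white"), ("light_blue", "beige"), ("light_blue", "light_blue"), ("light_blue", "pink"), ("pink", "white"), ("pink", "beige"), ("pink", "light_blue"), ("pink", "pink"), ("red", "red"), ("red", "orange"), ("red", "yellow"), ("orange", "red"), ("orange", "orange"), ("orange", "yellow"), ("yellow", "red"), ("yellow", "orange"), ("yellow", "yellow"), ("blue", "blue"), ("blue", "cyan"), ("blue", "green"), ("blue", "lime"), ("blue", "purple"), ("cyan", "blue"), ("cyan", "cyan"),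 ("cyan", "green"), ("cyan", "lime"), ("cyan", "purple"), ("green", "blue"), ("green", "cyan"), ("green", "green"), ("green", "lime"), ("green", "purple"), ("lime", "blue"), ("lime", "cyan"), ("lime", "green"), ("lime", "lime"), ("lime", "purple"), ("purple", "blue"), ("purple", "cyan"), ("purple", "green"), ("purple", "lime"), ("purple", "purple")] : List (String × String)) := by decide

lemma pv_A_false_left (c1 c2 : String) (h : c1 ∉ pvNames) :
    are_similar_colors c1 c2 = false := by
  simp only [pvNames, List.mem_cons, List.not_mem_nil, or_false, not_or] at h
  obtain ⟨n1, n2, n3, n4, n5, n6, n7, n8, n9, n10, n11, n12, n13, n14, n15, n16⟩ := h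
  simp [are_similar_colors, pvGroupLoop, pvDark, pvLight, pvWarm, pvCool,
    PySem.Set.contains, PySem.Set.ofList, PySem.Set.add,
    n1, n2, n3, n4, n5, n6, n7, n8, n9, n10, n11, n12, n13, n14, n15, n16]

lemma pv_A_false_right (c1 c2 : String) (h : c2 ∉ pvNames) :
    are_similar_colors c1 c2 = false := by
  simp only [pvNames, List.mem_cons, List.not_mem_nil, or_false, not_or] at h
  obtain ⟨n1, n2, n3, n4, n5, n6, n7, n8, n9, n10, n11, n12, n13, n14, n15, n16⟩ := h
  simp [are_similar_colors, pvGroupLoop, pvDark, pvLight, pvWarm, pvCool,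
    PySem.Set.contains, PySem.Set.ofList, PySem.Set.add,
    n1, n2, n3, n4, n5, n6, n7, n8, n9, n10, n11, n12, n13, n14, n15, n16]

lemma pv_B_false (c1 c2 : String) (h : c1 ∉ pvNames ∨ c2 ∉ pvNames) :
    are_similar_colors_alt c1 c2 = false := by
  have hmem : (c1, c2) ∉ SIMILAR_PAIRS := by
    rw [pv_pairs_eq]
    intro hm
    apply h.elim <;> intro hn <;> apply hn <;>
      simp only [List.mem_cons, List.not_mem_nil, or_false, Prod.mk.injEq, pvNames] at hm ⊢ <;>
      rcases hm with ⟨rfl, rfl⟩ | ⟨rfl, rfl⟩ | ⟨rfl, rfl⟩ | ⟨rfl, rfl⟩ | ⟨rfl, rfl⟩ | ⟨rfl, rfl⟩ |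
        ⟨rfl, rfl⟩ | ⟨rfl, rfl⟩ | ⟨rfl, rfl⟩ | ⟨rfl, rfl⟩ | ⟨rfl, rfl⟩ | ⟨rfl, rfl⟩ | ⟨rfl, rfl⟩ |
        ⟨rfl, rfl⟩ | ⟨rfl, rfl⟩ | ⟨rfl, rfl⟩ | ⟨rfl, rfl⟩ | ⟨rfl, rfl⟩ | ⟨rfl, rfl⟩ | ⟨rfl, rfl⟩ |
        ⟨rfl, rfl⟩ | ⟨rfl, rfl⟩ | ⟨rfl, rfl⟩ | ⟨rfl, rfl⟩ | ⟨rfl, rfl⟩ | ⟨rfl, rfl⟩ | ⟨rfl, rfl⟩ |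
        ⟨rfl, rfl⟩ | ⟨rfl, rfl⟩ | ⟨rfl, rfl⟩ | ⟨rfl, rfl⟩ | ⟨rfl, rfl⟩ | ⟨rfl, rfl⟩ | ⟨rfl, rfl⟩ |
        ⟨rfl, rfl⟩ | ⟨rfl, rfl⟩ | ⟨rfl, rfl⟩ | ⟨rfl, rfl⟩ | ⟨rfl, rfl⟩ | ⟨rfl, rfl⟩ | ⟨rfl, rfl⟩ |
        ⟨rfl, rfl⟩ | ⟨rfl, rfl⟩ | ⟨rfl, rfl⟩ | ⟨rfl, rfl⟩ | ⟨rfl, rfl⟩ | ⟨rfl, rfl⟩ | ⟨rfl, rfl⟩ |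
        ⟨rfl, rfl⟩ | ⟨rfl, rfl⟩ | ⟨rfl, rfl⟩ | ⟨rfl, rfl⟩ | ⟨rfl, rfl⟩ | ⟨rfl, rfl⟩ | ⟨rfl, rfl⟩ |
        ⟨rfl, rfl⟩ | ⟨rfl, rfl⟩ | ⟨rfl, rfl⟩ | ⟨rfl, rfl⟩ | ⟨rfl, rfl⟩ | ⟨rfl, rfl⟩ | ⟨rfl, rfl⟩ |
        ⟨rfl, rfl⟩ | ⟨rfl, rfl⟩ | ⟨rfl, rfl⟩ | ⟨rfl, rfl⟩ <;> simp
  simp [are_similar_colors_alt, PySem.Set.contains] at hmem ⊢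
  exact hmem

-- ===== VERDICT (by name: the statement is the Claim_ definition above) =====
set_option maxHeartbeats 4000000 in
set_option maxRecDepth 10000 in
theorem are_similar_colors_spec : Claim_equal_are_similar_colors := by
  intro c1 c2 _
  unfold Spec_are_similar_colors
  by_cases h1 : c1 ∈ pvNames
  · by_cases h2 : c2 ∈ pvNames
    · simp only [pvNames, List.mem_cons, List.not_mem_nil, or_false] at h1 h2
      rcases h1 with rfl | rfl | rfl | rfl | rfl | rfl | rfl | rfl | rfl | rfl | rfl | rfl | rfl |
          rfl | rfl | rfl <;>
        rcases h2 with rfl | rfl | rfl | rfl | rfl | rfl | rfl | rfl | rfl | rfl | rfl | rfl |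
          rfl | rfl | rfl | rfl <;> decide
    · rw [pv_A_false_right c1 c2 h2, pv_B_false c1 c2 (Or.inr h2)]
  · rw [pv_A_false_left c1 c2 h1, pv_B_false c1 c2 (Or.inl h1)]
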